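-- pv_equiv track=rewrite | github.com/krishna-dhulipalla/CoreLink-AI | src/agent/nodes/verifier.py | _requires_transactional_legal_depth
-- ===== SOURCE A (Python) =====
-- def _requires_transactional_legal_depth(task_text: str) -> bool:
--     normalized = (task_text or "").lower()
--     return any(
--         token in normalized
--         for token in (
--             "acquisition",
--             "merger",
--             "deal",
--             "stock consideration",
--             "liability",
--             "compliance",
--             "transaction",
--             "target company",
--         )
--     )
-- ===== SOURCE B (Python) =====
-- def _requires_transactional_legal_depth(task_text: str) -> bool:
--     keywords = (
--         "acquisition",
--         "merger",
--         "deal",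
--         "stock consideration",
--         "liability",
--         "compliance",
--         "transaction",
--         "target company",
--     )
--     s = (task_text or "").lower()
--     for i in range(len(s)):
--         for kw in keywords:
--             if s.startswith(kw, i):
--                 return True
--     return False
-- ===== Notes on version B (the rewrite author's own statement) =====
-- stated objective: alternative
-- what changed: Replaces eight independent whole-text substring membership tests with a single left-to-right scan over the lowered text that at each position checks whether any keyword starts there, returning on the first hit.
import Mathlib
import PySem

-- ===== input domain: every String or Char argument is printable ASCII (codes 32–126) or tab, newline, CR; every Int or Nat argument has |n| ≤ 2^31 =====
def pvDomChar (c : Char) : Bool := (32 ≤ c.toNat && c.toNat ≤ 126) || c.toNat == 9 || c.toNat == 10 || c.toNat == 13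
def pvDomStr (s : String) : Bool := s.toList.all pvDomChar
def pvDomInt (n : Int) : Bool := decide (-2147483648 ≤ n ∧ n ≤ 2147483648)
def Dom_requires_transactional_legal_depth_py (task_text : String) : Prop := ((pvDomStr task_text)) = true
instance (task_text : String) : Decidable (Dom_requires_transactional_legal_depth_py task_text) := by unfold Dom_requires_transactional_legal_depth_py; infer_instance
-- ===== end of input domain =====

-- B replaces eight independent substring searches with one left-to-right position scan
-- that checks all keywords at each position (objective: alternative, same exact result).

-- ===== PORT A =====
-- the tuple of tokens A iterates over with `token in normalized`
def pvTokensA : List String :=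
  ["acquisition", "merger", "deal", "stock consideration",
   "liability", "compliance", "transaction", "target company"]

def requires_transactional_legal_depth_py (task_text : String) : Bool :=
  let normalized := PySem.Str.lower (if task_text == "" then "" else task_text)
  pvTokensA.any (fun token => PySem.Str.isIn token normalized)

-- ===== PORT B =====
-- B's local keyword tuple
def pvKeywordsB : List String :=
  ["acquisition", "merger", "deal", "stock consideration",
   "liability", "compliance", "transaction", "target company"]

-- B's outer loop `for i in range(len(s))` scanning suffixes; inner loop checks
-- `s.startswith(kw, i)` for each keyword and returns True on the first hit.
def pvScanB (kws : List String) : List Char → Bool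
  | [] => false
  | c :: rest => kws.any (fun kw => kw.toList.isPrefixOf (c :: rest)) || pvScanB kws rest

def requires_transactional_legal_depth_py_alt (task_text : String) : Bool :=
  let s := PySem.Str.lower (if task_text == "" then "" else task_text)
  pvScanB pvKeywordsB s.toList

-- ===== PRECONDITION & SPEC =====
def Spec_requires_transactional_legal_depth_py (task_text : String) (out : Bool) : Prop := out = requires_transactional_legal_depth_py_alt task_text
instance (task_text : String) (out : Bool) : Decidable (Spec_requires_transactional_legal_depth_py task_text out) := by unfold Spec_requires_transactional_legal_depth_py; infer_instance

-- ===== CLAIM (what is proved, stated in full; the proofs are below) =====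
def Claim_equal_requires_transactional_legal_depth_py : Prop := ∀ (task_text : String), Dom_requires_transactional_legal_depth_py task_text → Spec_requires_transactional_legal_depth_py task_text (requires_transactional_legal_depth_py task_text)

-- ===== LEMMAS AND PROOFS =====

-- the position scan finds exactly the keywords occurring as an infix (for non-empty keywords)
lemma pvScanB_iff (kws : List String) (hne : ∀ kw ∈ kws, kw.toList ≠ []) (l : List Char) :
    pvScanB kws l = true ↔ ∃ kw ∈ kws, kw.toList <:+: l := by
  induction l with
  | nil =>
    simp only [pvScanB]
    constructor
    · intro h; cases h
    · rintro ⟨kw, hkw, h⟩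
      exact absurd (List.infix_nil.mp h) (hne kw hkw)
  | cons c rest ih =>
    simp only [pvScanB, Bool.or_eq_true, List.any_eq_true, ih,
      List.isPrefixOf_iff_prefix, List.infix_cons_iff]
    constructor
    · rintro (⟨kw, hkw, h⟩ | ⟨kw, hkw, h⟩)
      · exact ⟨kw, hkw, Or.inl h⟩
      · exact ⟨kw, hkw, Or.inr h⟩
    · rintro ⟨kw, hkw, h | h⟩
      · exact Or.inl ⟨kw, hkw, h⟩
      · exact Or.inr ⟨kw, hkw, h⟩

-- ===== VERDICT (by name: the statement is the Claim_ definition above) =====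
theorem requires_transactional_legal_depth_py_spec : Claim_equal_requires_transactional_legal_depth_py := by
  intro task_text _
  unfold Spec_requires_transactional_legal_depth_py
  unfold requires_transactional_legal_depth_py requires_transactional_legal_depth_py_alt
  rw [Bool.eq_iff_iff]
  rw [pvScanB_iff pvKeywordsB (by decide)]
  simp only [List.any_eq_true, PySem.Str.isIn_eq, PySem.Chars.isIn_iff_infix]
  rfl
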